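-- pv_equiv track=rewrite | github.com/galacticue06/ast | lexer.py | prim_br
-- ===== SOURCE A (Python) =====
-- def prim_br(string):
--     inds = []
--     br = 0
--     rev = 0
--     for i in range(len(string)):
--         rev = 0
--         if string[i] == "(":
--             br += 1
--             if br == 1 and rev == 0:
--                 rev = 1
--         elif string[i] == ")":
--             br -= 1
--             rev = 0
--         if br == 1 and rev == 1:
--             inds.append(i)
--     return inds
-- ===== SOURCE B (Python) =====
-- def prim_br(string):
--     # Materialize the running bracket depth after each character, then
--     # filter: an index is kept iff it holds '(' and the depth there is 1.
--     depths = []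
--     d = 0
--     for c in string:
--         d += (c == "(") - (c == ")")
--         depths.append(d)
--     return [i for i, (c, d) in enumerate(zip(string, depths)) if c == "(" and d == 1]
-- ===== Notes on version B (the rewrite author's own statement) =====
-- stated objective: alternative
-- what changed: Replaces A's online counter with leftover rev-flag bookkeeping and a conditional append by a two-phase decomposition: first materialize the per-index running bracket depth table, then a filtering comprehension keeps the indices of opening brackets whose depth is 1.
import Mathlib
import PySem

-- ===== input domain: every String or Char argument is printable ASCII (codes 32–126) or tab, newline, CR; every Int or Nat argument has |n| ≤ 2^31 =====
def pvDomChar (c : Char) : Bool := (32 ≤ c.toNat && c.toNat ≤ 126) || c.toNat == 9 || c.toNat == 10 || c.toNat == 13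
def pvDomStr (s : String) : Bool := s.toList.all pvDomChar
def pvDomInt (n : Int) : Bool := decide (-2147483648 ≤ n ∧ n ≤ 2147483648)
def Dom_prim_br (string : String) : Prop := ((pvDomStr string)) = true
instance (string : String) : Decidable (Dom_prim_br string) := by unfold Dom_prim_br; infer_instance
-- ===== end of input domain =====

-- B replaces A's online counter+rev-flag with a materialized depth table plus a filtering pass (alternative decomposition, same cost).


-- ===== PORT A =====
-- one iteration of A's loop body; state = (inds, br, rev)
def prim_brStep (st : List Int × Int × Int) (p : Int × Char) : List Int × Int × Int :=
  let inds := st.1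
  let br := st.2.1
  let rev : Int := 0
  if p.2 = '(' then
    let br := br + 1
    let rev := if br = 1 ∧ rev = 0 then (1 : Int) else rev
    (if br = 1 ∧ rev = 1 then inds ++ [p.1] else inds, br, rev)
  else if p.2 = ')' then
    let br := br - 1
    let rev : Int := 0
    (if br = 1 ∧ rev = 1 then inds ++ [p.1] else inds, br, rev)
  else
    (if br = 1 ∧ rev = 1 then inds ++ [p.1] else inds, br, rev)

def prim_br (string : String) : List Int :=
  ((PySem.List.enumerate string.toList 0).foldl prim_brStep ([], 0, 0)).1

-- ===== PORT B =====
-- first pass: running depth after each character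
def prim_brDepthStep (acc : List Int × Int) (c : Char) : List Int × Int :=
  let d := acc.2 + (if c = '(' then (1 : Int) else 0) - (if c = ')' then (1 : Int) else 0)
  (acc.1 ++ [d], d)

def prim_br_alt (string : String) : List Int :=
  (PySem.List.enumerate
      (string.toList.zip ((string.toList.foldl prim_brDepthStep ([], 0)).1)) 0).filterMap
    (fun p => if p.2.1 = '(' ∧ p.2.2 = 1 then some p.1 else none)

-- ===== PRECONDITION & SPEC =====
def Spec_prim_br (string : String) (out : List Int) : Prop := out = prim_br_alt string
instance (string : String) (out : List Int) : Decidable (Spec_prim_br string out) := by unfold Spec_prim_br; infer_instance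

-- ===== CLAIM (what is proved, stated in full; the proofs are below) =====
def Claim_equal_prim_br : Prop := ∀ (string : String), Dom_prim_br string → Spec_prim_br string (prim_br string)

-- ===== LEMMAS AND PROOFS =====

def pvDelta (c : Char) : Int := (if c = '(' then 1 else 0) - (if c = ')' then 1 else 0)

-- common characterisation: indices n, n+1, … holding '(' where the running depth (from b) becomes 1
def pvGo (n b : Int) : List Char → List Int
  | [] => []
  | c :: cs => (if c = '(' ∧ b + pvDelta c = 1 then [n] else []) ++ pvGo (n + 1) (b + pvDelta c) cs

def pvDepths (b : Int) : List Char → List Int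
  | [] => []
  | c :: cs => (b + pvDelta c) :: pvDepths (b + pvDelta c) cs

def pvFinal (b : Int) : List Char → Int
  | [] => b
  | c :: cs => pvFinal (b + pvDelta c) cs

theorem pvA_foldl (cs : List Char) : ∀ (n b r : Int) (inds : List Int),
    (List.foldl prim_brStep (inds, b, r) (PySem.List.enumerate cs n)).1 = inds ++ pvGo n b cs := by
  induction cs with
  | nil => intro n b r inds; simp [PySem.List.enumerate_nil, pvGo]
  | cons c cs ih =>
    intro n b r inds
    rw [PySem.List.enumerate_cons]
    simp only [List.foldl_cons]
    by_cases h1 : c = '('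
    · subst h1
      by_cases h2 : b + 1 = 1
      · simp [prim_brStep, pvGo, pvDelta, h2, ih]
      · simp [prim_brStep, pvGo, pvDelta, h2, ih]
    · by_cases h2 : c = ')'
      · subst h2
        simp [prim_brStep, pvGo, pvDelta, ih, sub_eq_add_neg]
      · simp [prim_brStep, pvGo, pvDelta, h1, h2, ih]

theorem pvDepths_foldl (cs : List Char) : ∀ (b : Int) (acc : List Int),
    List.foldl prim_brDepthStep (acc, b) cs = (acc ++ pvDepths b cs, pvFinal b cs) := by
  induction cs with
  | nil => intro b acc; simp [pvDepths, pvFinal]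
  | cons c cs ih =>
    intro b acc
    have hd : b + (if c = '(' then (1 : Int) else 0) - (if c = ')' then (1 : Int) else 0)
        = b + pvDelta c := by unfold pvDelta; ring
    simp only [List.foldl_cons, prim_brDepthStep, hd, ih, pvDepths, pvFinal]
    simp

theorem pvFilter_zip (cs : List Char) : ∀ (n b : Int),
    (PySem.List.enumerate (cs.zip (pvDepths b cs)) n).filterMap
      (fun p => if p.2.1 = '(' ∧ p.2.2 = 1 then some p.1 else none) = pvGo n b cs := by
  induction cs with
  | nil => intro n b; simp [pvDepths, pvGo, PySem.List.enumerate_nil]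
  | cons c cs ih =>
    intro n b
    rw [pvDepths, List.zip_cons_cons, PySem.List.enumerate_cons]
    by_cases h : c = '(' ∧ b + pvDelta c = 1
    · obtain ⟨hc, hd⟩ := h
      subst hc
      simp [pvGo, hd, ih]
    · simp [pvGo, h, ih]

-- ===== VERDICT (by name: the statement is the Claim_ definition above) =====
theorem prim_br_spec : Claim_equal_prim_br := by
  intro s _
  unfold Spec_prim_br prim_br prim_br_alt
  rw [pvA_foldl, pvDepths_foldl]
  simp only [List.nil_append]
  rw [pvFilter_zip]
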